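-- pv_equiv track=rewrite | github.com/youjin0411/Python | 수행준비_1차/yest01.py | solution
-- ===== SOURCE A (Python) =====
-- def solution(size):
--
--     cnt = [0,0,0,0,0,0]
--
--     for ch in size:
--         if ch == "XS" :
--             cnt[0]+=1
--         elif ch == "S" :
--             cnt[1]+=1
--         elif ch == "M" :
--             cnt[2]+=1
--         elif ch == "L" :
--             cnt[3]+=1
--         elif ch == "XL" :
--             cnt[4]+=1
--         elif ch == "XXL" :
--             cnt[5]+=1
--
--     return cnt
-- ===== SOURCE B (Python) =====
-- def solution(size):
--     return [size.count(s) for s in ("XS", "S", "M", "L", "XL", "XXL")]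
-- ===== Notes on version B (the rewrite author's own statement) =====
-- stated objective: simpler
-- what changed: Replaces the single dispatching loop with mutable counters by one list.count pass per fixed label, building the result as a comprehension over the six labels.
import Mathlib
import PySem

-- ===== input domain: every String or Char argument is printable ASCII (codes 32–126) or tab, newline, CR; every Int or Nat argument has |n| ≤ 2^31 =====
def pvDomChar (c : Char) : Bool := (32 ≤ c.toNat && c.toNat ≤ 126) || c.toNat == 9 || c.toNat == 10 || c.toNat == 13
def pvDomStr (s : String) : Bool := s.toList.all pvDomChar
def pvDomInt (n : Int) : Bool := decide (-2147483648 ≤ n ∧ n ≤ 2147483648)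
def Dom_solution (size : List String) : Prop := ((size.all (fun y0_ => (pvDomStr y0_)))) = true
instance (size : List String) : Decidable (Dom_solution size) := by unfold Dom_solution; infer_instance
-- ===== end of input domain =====

-- B replaces A's single dispatching loop over six mutable counters by one count pass per fixed label (simpler).

-- ===== PORT A =====
-- A's cnt = [0,0,0,0,0,0] is carried positionally as a 6-tuple of Ints; each branch bumps the matching slot.
def solutionStep (cnt : Int × Int × Int × Int × Int × Int) (ch : String) :
    Int × Int × Int × Int × Int × Int :=
  let (a, b, c, d, e, f) := cnt
  if ch = "XS" then (a + 1, b, c, d, e, f)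
  else if ch = "S" then (a, b + 1, c, d, e, f)
  else if ch = "M" then (a, b, c + 1, d, e, f)
  else if ch = "L" then (a, b, c, d + 1, e, f)
  else if ch = "XL" then (a, b, c, d, e + 1, f)
  else if ch = "XXL" then (a, b, c, d, e, f + 1)
  else (a, b, c, d, e, f)

def solution (size : List String) : List Int :=
  let (a, b, c, d, e, f) := size.foldl solutionStep (0, 0, 0, 0, 0, 0)
  [a, b, c, d, e, f]

-- ===== PORT B =====
def solution_alt (size : List String) : List Int :=
  ["XS", "S", "M", "L", "XL", "XXL"].map (fun s => (size.count s : Int))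

-- ===== PRECONDITION & SPEC =====
def Spec_solution (size : List String) (out : List Int) : Prop := out = solution_alt size
instance (size : List String) (out : List Int) : Decidable (Spec_solution size out) := by unfold Spec_solution; infer_instance

-- ===== CLAIM (what is proved, stated in full; the proofs are below) =====
def Claim_equal_solution : Prop := ∀ (size : List String), Dom_solution size → Spec_solution size (solution size)

-- ===== LEMMAS AND PROOFS =====
theorem solution_fold (size : List String) (a b c d e f : Int) :
    size.foldl solutionStep (a, b, c, d, e, f) =
      (a + size.count "XS", b + size.count "S", c + size.count "M",
       d + size.count "L", e + size.count "XL", f + size.count "XXL") := by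
  induction size generalizing a b c d e f with
  | nil => simp
  | cons x xs ih =>
    simp only [List.foldl_cons, List.count_cons, solutionStep]
    by_cases h1 : x = "XS" <;> by_cases h2 : x = "S" <;> by_cases h3 : x = "M" <;>
      by_cases h4 : x = "L" <;> by_cases h5 : x = "XL" <;> by_cases h6 : x = "XXL" <;>
      simp_all [ih] <;> push_cast <;> ring

-- ===== VERDICT (by name: the statement is the Claim_ definition above) =====
theorem solution_spec : Claim_equal_solution := by
  intro size _
  unfold Spec_solution solution solution_alt
  rw [solution_fold]
  simp
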